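-- pv_equiv track=rewrite | github.com/TinMon11/python-algoritmos-estructuras | basicos/ejercicios_2.py | diferencias
-- ===== SOURCE A (Python) =====
-- def diferencias(lista1, lista2):
--
--     hash_map = {}
--     diferencia = []
--
--     for elemento in lista1:
--         hash_map[elemento] = hash_map.get(elemento, 0) + 1
--
--     for elemento in lista2:
--         hash_map[elemento] = hash_map.get(elemento, 0) - 1
--
--     for key, value in hash_map.items():
--         if value != 0:
--             diferencia.append(key)
--
--     return diferencia
-- ===== SOURCE B (Python) =====
-- def diferencias(lista1, lista2):
--     vistos = set()
--     diferencia = []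
--     for elemento in lista1 + lista2:
--         if elemento not in vistos:
--             vistos.add(elemento)
--             if lista1.count(elemento) != lista2.count(elemento):
--                 diferencia.append(elemento)
--     return diferencia
-- ===== Notes on version B (the rewrite author's own statement) =====
-- stated objective: simpler
-- what changed: Replaces the signed count dict with a single first-appearance pass over lista1+lista2 guarded by a seen set, emitting each element whose occurrence counts in the two lists differ (list.count), so no hash map of net counts is built.
import Mathlib
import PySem

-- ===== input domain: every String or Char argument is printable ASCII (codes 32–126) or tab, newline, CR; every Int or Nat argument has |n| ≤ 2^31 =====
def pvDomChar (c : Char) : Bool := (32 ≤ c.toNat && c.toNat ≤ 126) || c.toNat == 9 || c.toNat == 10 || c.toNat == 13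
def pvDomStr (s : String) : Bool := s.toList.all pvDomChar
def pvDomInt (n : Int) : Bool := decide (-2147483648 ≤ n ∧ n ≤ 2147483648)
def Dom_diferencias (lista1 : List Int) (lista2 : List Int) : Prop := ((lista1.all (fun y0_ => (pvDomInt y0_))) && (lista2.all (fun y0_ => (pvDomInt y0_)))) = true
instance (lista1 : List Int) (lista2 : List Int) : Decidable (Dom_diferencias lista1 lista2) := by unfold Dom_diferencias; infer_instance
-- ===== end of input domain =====

-- B replaces A's signed net-count dict with one first-appearance pass over lista1+lista2
-- guarded by a seen set, emitting elements whose per-list occurrence counts differ (simpler, not faster).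

-- ===== PORT A =====
def diferencias (lista1 : List Int) (lista2 : List Int) : List Int :=
  let hm1 : PySem.Dict Int Int :=
    lista1.foldl (fun d elemento => d.insert elemento (d.getD elemento 0 + 1)) PySem.Dict.empty
  let hm2 : PySem.Dict Int Int :=
    lista2.foldl (fun d elemento => d.insert elemento (d.getD elemento 0 - 1)) hm1
  hm2.items.foldl (fun acc kv => if kv.2 ≠ 0 then acc ++ [kv.1] else acc) []

-- ===== PORT B =====
def diferencias_alt (lista1 : List Int) (lista2 : List Int) : List Int :=
  ((lista1 ++ lista2).foldl
    (fun (st : PySem.Set Int × List Int) elemento =>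
      if PySem.Set.contains st.1 elemento then st
      else (PySem.Set.add st.1 elemento,
            if PySem.List.count lista1 elemento ≠ PySem.List.count lista2 elemento
            then st.2 ++ [elemento] else st.2))
    (PySem.Set.empty, [])).2

-- ===== PRECONDITION & SPEC =====
def Spec_diferencias (lista1 : List Int) (lista2 : List Int) (out : List Int) : Prop := out = diferencias_alt lista1 lista2
instance (lista1 : List Int) (lista2 : List Int) (out : List Int) : Decidable (Spec_diferencias lista1 lista2 out) := by unfold Spec_diferencias; infer_instance

-- ===== CLAIM (what is proved, stated in full; the proofs are below) =====
def Claim_equal_diferencias : Prop := ∀ (lista1 : List Int) (lista2 : List Int), Dom_diferencias lista1 lista2 → Spec_diferencias lista1 lista2 (diferencias lista1 lista2)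

-- ===== LEMMAS AND PROOFS =====

-- A's second loop: each insert of getD-1 subtracts this list's count.
theorem getD_foldl_insert_sub_one : ∀ (l : List Int) (d : PySem.Dict Int Int) (v : Int),
    (l.foldl (fun d e => d.insert e (d.getD e 0 - 1)) d).getD v 0 = d.getD v 0 - l.count v := by
  intro l
  induction l with
  | nil => intro d v; simp
  | cons x xs ih =>
    intro d v
    simp only [List.foldl_cons]
    rw [ih, PySem.Dict.getD_insert]
    by_cases h : v = x
    · subst h
      simp [List.count_cons]
      ring
    · simp [h, Ne.symm h]

-- Set.update only appends new elements.
theorem update_exists_suffix (l : List Int) (s : PySem.Set Int) : ∃ t, PySem.Set.update s l = s ++ t :=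
  ⟨_, PySem.Set.update_eq_append_filter s l⟩

-- B's loop: emits, after acc, the not-yet-seen elements (in first-appearance order) satisfying q.
theorem b_loop_spec (q : Int → Prop) [DecidablePred q] :
    ∀ (l : List Int) (s : PySem.Set Int) (acc : List Int),
    (l.foldl
      (fun (st : PySem.Set Int × List Int) e =>
        if PySem.Set.contains st.1 e then st
        else (PySem.Set.add st.1 e, if q e then st.2 ++ [e] else st.2))
      (s, acc)).2
    = acc ++ ((PySem.Set.update s l).drop s.length).filter (fun e => decide (q e)) := by
  intro l
  induction l with
  | nil => intro s acc; simp [PySem.Set.update_nil]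
  | cons x xs ih =>
    intro s acc
    simp only [List.foldl_cons, PySem.Set.update_cons]
    by_cases hc : PySem.Set.contains s x
    · have hm : x ∈ s := (PySem.Set.contains_iff s x).mp hc
      have hadd : PySem.Set.add s x = s := PySem.Set.add_of_mem hm
      simp only [hc, if_true, hadd]
      exact ih s acc
    · have hm : x ∉ s := fun h => hc ((PySem.Set.contains_iff s x).mpr h)
      have hadd : PySem.Set.add s x = s ++ [x] := PySem.Set.add_of_not_mem hm
      simp only [hc, if_false, Bool.false_eq_true]
      rw [ih]
      obtain ⟨t, ht⟩ := update_exists_suffix xs (PySem.Set.add s x)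
      rw [ht, hadd]
      have h1 : ((s ++ [x]) ++ t).drop (s ++ [x]).length = t := by
        rw [List.drop_left]
      have h2 : ((s ++ [x]) ++ t).drop s.length = x :: t := by
        rw [List.append_assoc, List.drop_left]
        simp
      rw [h1, h2]
      by_cases hq : q x <;> simp [hq]

-- A's third loop collects keys with nonzero value.
theorem foldl_append_ne_zero : ∀ (l : List (Int × Int)) (acc : List Int),
    l.foldl (fun acc kv => if kv.2 ≠ 0 then acc ++ [kv.1] else acc) acc
    = acc ++ (l.filter (fun kv => decide (kv.2 ≠ 0))).map (·.1) := by
  intro l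
  induction l with
  | nil => intro acc; simp
  | cons kv l ih =>
    intro acc
    simp only [List.foldl_cons]
    by_cases h : kv.2 ≠ 0
    · rw [if_pos h, ih, List.filter_cons_of_pos (by simpa using h)]
      simp
    · rw [if_neg h, ih, List.filter_cons_of_neg (by simpa using h)]

-- ===== VERDICT (by name: the statement is the Claim_ definition above) =====
theorem diferencias_spec : Claim_equal_diferencias := by
  intro lista1 lista2 _
  unfold Spec_diferencias diferencias diferencias_alt
  -- A side
  have hnd1 : (lista1.foldl (fun d elemento => d.insert elemento (d.getD elemento 0 + 1)) (PySem.Dict.empty : PySem.Dict Int Int)).keys.Nodup :=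
    PySem.Dict.nodup_keys_foldl_insert _ _ _ (by simp)
  have hnd2 : (lista2.foldl (fun d elemento => d.insert elemento (d.getD elemento 0 - 1))
      (lista1.foldl (fun d elemento => d.insert elemento (d.getD elemento 0 + 1)) (PySem.Dict.empty : PySem.Dict Int Int))).keys.Nodup :=
    PySem.Dict.nodup_keys_foldl_insert _ _ _ hnd1
  rw [foldl_append_ne_zero]
  rw [PySem.Dict.items_eq_map_keys _ hnd2 0]
  rw [PySem.Dict.keys_foldl_insert, PySem.Dict.keys_foldl_insert, PySem.Dict.keys_empty]
  -- B side
  rw [b_loop_spec (fun e => PySem.List.count lista1 e ≠ PySem.List.count lista2 e) (lista1 ++ lista2) PySem.Set.empty []]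
  rw [PySem.Set.update_append]
  simp only [PySem.Set.empty, List.length_nil, List.drop_zero, List.nil_append,
    List.filter_map, List.map_map, Function.comp_def, List.map_id']
  apply List.filter_congr
  intro k _
  rw [getD_foldl_insert_sub_one, PySem.Dict.getD_foldl_insert_add_one, PySem.Dict.getD_empty,
    PySem.List.count_eq, PySem.List.count_eq]
  simp only [decide_eq_decide]
  omega
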